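-- pv_equiv track=rewrite | github.com/hms-dbmi/UDN-gateway-clusters | UDN_utils_disease_enrichment.py | get_associated_groups
-- ===== SOURCE A (Python) =====
-- def get_associated_groups(associated_dis,all_diseases):
--     """get the count of associations between clusters and the large groups of the HPO hierarchy
--
--     Parameters: associated_dis (dict) : dict with cluster as key, list of unique associated diseases as values
--                 all_diseases (dict): dict with Orphanet large groups as keys, list of associated diseases as values
--
--     Returns: ass_group (dict): dict with cluster as key, list of associated large groups as values
--     """
--     ass_group = {cl: [] for cl in associated_dis}
--     for cl in associated_dis:
--         for dis in associated_dis[cl]: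
--             for dis_group in list(all_diseases.keys()):
--                 if dis in all_diseases[dis_group]:
--                     ass_group[cl].append(dis_group)
--     return ass_group
-- ===== SOURCE B (Python) =====
-- def get_associated_groups(associated_dis, all_diseases):
--     # Build a disease -> [groups] index once (groups in key order), then
--     # assemble each cluster's group list by O(1) lookups.
--     index = {}
--     for group, diseases in all_diseases.items():
--         for dis in dict.fromkeys(diseases):
--             index.setdefault(dis, []).append(group)
--     return {cl: [g for dis in dis_list for g in index.get(dis, [])]
--             for cl, dis_list in associated_dis.items()}
-- ===== Notes on version B (the rewrite author's own statement) =====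
-- stated objective: faster
-- what changed: Replaces A's per-cluster, per-disease scan over every group's whole disease list with a single pass that builds a disease-to-groups index, so each cluster's result is assembled by hash lookups.
import Mathlib
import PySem

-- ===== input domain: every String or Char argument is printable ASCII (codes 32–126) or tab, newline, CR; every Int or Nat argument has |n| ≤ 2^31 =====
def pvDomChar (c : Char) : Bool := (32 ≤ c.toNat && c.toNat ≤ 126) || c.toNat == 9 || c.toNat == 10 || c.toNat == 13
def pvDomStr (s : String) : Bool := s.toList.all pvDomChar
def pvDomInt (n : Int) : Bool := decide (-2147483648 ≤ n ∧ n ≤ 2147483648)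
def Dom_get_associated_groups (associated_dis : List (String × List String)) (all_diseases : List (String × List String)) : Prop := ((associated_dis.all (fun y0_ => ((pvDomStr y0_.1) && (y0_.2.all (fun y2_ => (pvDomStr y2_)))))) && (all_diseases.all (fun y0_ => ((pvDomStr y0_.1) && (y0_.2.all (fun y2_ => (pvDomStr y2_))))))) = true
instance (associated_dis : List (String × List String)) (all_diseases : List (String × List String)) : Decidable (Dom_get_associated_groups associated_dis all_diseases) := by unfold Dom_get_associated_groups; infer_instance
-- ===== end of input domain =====

-- B replaces A's per-cluster/per-disease scan over every group's disease list with a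
-- disease→groups index built in one pass over all_diseases, then assembles each cluster
-- by lookups (objective: faster, asymptotically).


-- ===== PORT A =====
-- Dicts are association lists with unique keys (the type convention); so the comprehension
-- 'ass_group = {cl: [] for cl}' followed by in-place appends to ass_group[cl] is, key by key,
-- the per-pair accumulation below; iteration over a dict's keys is iteration over the pairs.
def get_associated_groups (associated_dis : List (String × List String)) (all_diseases : List (String × List String)) : List (String × List String) :=
  associated_dis.map (fun cl =>
    (cl.1, cl.2.foldl (fun acc dis =>
      all_diseases.foldl (fun acc2 p =>
        if p.2.contains dis then acc2 ++ [p.1] else acc2) acc) []))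

-- ===== PORT B =====
-- index.setdefault(dis, []).append(group) is Dict.modify dis [] (· ++ [group]);
-- dict.fromkeys(diseases) (ordered dedup) is PySem.List.dedup.
def pvIndex (all_diseases : List (String × List String)) : PySem.Dict String (List String) :=
  all_diseases.foldl (fun ix p =>
    (PySem.List.dedup p.2).foldl (fun ix2 d => ix2.modify d [] (· ++ [p.1])) ix)
    PySem.Dict.empty

def get_associated_groups_alt (associated_dis : List (String × List String)) (all_diseases : List (String × List String)) : List (String × List String) :=
  let ix := pvIndex all_diseases
  associated_dis.map (fun cl => (cl.1, cl.2.flatMap (fun d => ix.getD d [])))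

-- ===== PRECONDITION & SPEC =====
def Spec_get_associated_groups (associated_dis : List (String × List String)) (all_diseases : List (String × List String)) (out : List (String × List String)) : Prop := out = get_associated_groups_alt associated_dis all_diseases
instance (associated_dis : List (String × List String)) (all_diseases : List (String × List String)) (out : List (String × List String)) : Decidable (Spec_get_associated_groups associated_dis all_diseases out) := by unfold Spec_get_associated_groups; infer_instance

-- ===== CLAIM (what is proved, stated in full; the proofs are below) =====
def Claim_equal_get_associated_groups : Prop := ∀ (associated_dis : List (String × List String)) (all_diseases : List (String × List String)), Dom_get_associated_groups associated_dis all_diseases → Spec_get_associated_groups associated_dis all_diseases (get_associated_groups associated_dis all_diseases)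

-- ===== LEMMAS AND PROOFS =====

-- On a Nodup list, filtering for equality with d keeps exactly [d] when d is present.
theorem pv_filter_beq_of_nodup (l : List String) (d : String) (h : l.Nodup) :
    l.filter (· == d) = if d ∈ l then [d] else [] := by
  induction l with
  | nil => simp
  | cons x xs ih =>
    simp at h
    by_cases hx : x = d
    · subst hx
      have : List.filter (fun a => a == x) xs = [] :=
        List.filter_eq_nil_iff.mpr (fun a ha hb => h.1 (beq_iff_eq.mp hb ▸ ha))
      simp [this]
    · simp [hx, ih h.2, Ne.symm hx]

-- The index built by pvIndex's loop: each disease maps to the groups containing it, in order.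
theorem pvIndex_getD (all_diseases : List (String × List String))
    (ix : PySem.Dict String (List String)) (d : String) :
    (all_diseases.foldl (fun ix p =>
        (PySem.List.dedup p.2).foldl (fun ix2 x => ix2.modify x [] (· ++ [p.1])) ix) ix).getD d []
      = ix.getD d [] ++ (all_diseases.filter (fun p => p.2.contains d)).map (·.1) := by
  induction all_diseases generalizing ix with
  | nil => simp
  | cons p ps ih =>
    simp only [List.foldl_cons]
    rw [ih]
    have hstep : ((PySem.List.dedup p.2).foldl (fun ix2 x => ix2.modify x [] (· ++ [p.1])) ix).getD d []
        = ix.getD d [] ++ (if d ∈ p.2 then [p.1] else []) := by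
      have hm : (PySem.List.dedup p.2).foldl (fun ix2 x => ix2.modify x [] (· ++ [p.1])) ix
          = ((PySem.List.dedup p.2).map (fun x => (x, p.1))).foldl
              (fun ix2 q => ix2.modify q.1 [] (· ++ [q.2])) ix := by
        rw [List.foldl_map]
      rw [hm, PySem.Dict.getD_foldl_modify_append, List.filter_map]
      have : (PySem.List.dedup p.2).filter ((fun q => q.1 == d) ∘ (fun x => (x, p.1)))
          = if d ∈ p.2 then [d] else [] := by
        have := pv_filter_beq_of_nodup (PySem.List.dedup p.2) d (PySem.List.nodup_dedup p.2)
        simpa [Function.comp, PySem.List.mem_dedup] using this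
      rw [this]
      by_cases hd : d ∈ p.2 <;> simp [hd]
    rw [hstep]
    by_cases hd : d ∈ p.2 <;> simp [hd, List.append_assoc]

-- ===== VERDICT (by name: the statement is the Claim_ definition above) =====
theorem get_associated_groups_spec : Claim_equal_get_associated_groups := by
  intro associated_dis all_diseases _hdom
  unfold Spec_get_associated_groups get_associated_groups get_associated_groups_alt
  refine List.map_congr_left (fun cl _ => ?_)
  refine Prod.ext rfl ?_
  show cl.2.foldl _ [] = cl.2.flatMap _
  have hinner : ∀ (acc : List String) (dis : String),
      all_diseases.foldl (fun acc2 p => if p.2.contains dis then acc2 ++ [p.1] else acc2) acc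
        = acc ++ (pvIndex all_diseases).getD dis [] := by
    intro acc dis
    rw [PySem.List.foldl_append_if (fun p => p.2.contains dis) (·.1) all_diseases acc]
    unfold pvIndex
    rw [pvIndex_getD]
    simp
  calc cl.2.foldl (fun acc dis =>
          all_diseases.foldl (fun acc2 p => if p.2.contains dis then acc2 ++ [p.1] else acc2) acc) []
      = cl.2.foldl (fun acc dis => acc ++ (pvIndex all_diseases).getD dis []) [] := by
        induction cl.2 using List.reverseRecOn with
        | nil => rfl
        | append_singleton xs x ihx =>
            rw [List.foldl_append, List.foldl_append]
            simp only [List.foldl_cons, List.foldl_nil]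
            rw [hinner, ihx]
    _ = cl.2.flatMap (fun d => (pvIndex all_diseases).getD d []) := by
        simp [List.flatMap_eq_foldl]
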